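-- pv_equiv track=rewrite | github.com/posl/comment_recommendation | script/split_gen/4_time/zh/177_B/0.py | min_change
-- ===== SOURCE A (Python) =====
-- def min_change(s, t):
--     # s: str, t: str
--     # return: int
--     # 将s中的某些字符改变，使得t成为s的子串，求改变的最小字符数
--     # 例如，将s中的第四个字符a改为c，就可以将s中的第二至第四个字符匹配到t
--     # 由于s本身没有t作为它的子串，这个变化的数量--1--是最小的需要
--     len_s = len(s)
--     len_t = len(t)
--     if len_s < len_t:
--         return -1
--     min_change_count = len_s
--     for i in range(len_s - len_t + 1):
--         change_count = 0
--         for j in range(len_t):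
--             if s[i + j] != t[j]:
--                 change_count += 1
--         if change_count < min_change_count:
--             min_change_count = change_count
--     return min_change_count
-- ===== SOURCE B (Python) =====
-- def _first_at_least(js, x):
--     # index of the first element >= x in the ascending list js (hand-rolled
--     # bisect_left: the module rules here allow no imports)
--     lo, hi = 0, len(js)
--     while lo < hi:
--         mid = (lo + hi) // 2
--         if js[mid] < x:
--             lo = mid + 1
--         else:
--             hi = mid
--     return lo
--
--
-- def min_change(s, t):
--     # Different algorithm: index t's characters by position, then scan s once,
--     # scatter-counting MATCHES per window diagonal (only the in-window slice of
--     # each position list, located by binary search); answer = len(t) - best match.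
--     n = len(s)
--     m = len(t)
--     if n < m:
--         return -1
--     noff = n - m + 1
--     where = {}
--     for j, ch in enumerate(t):
--         where.setdefault(ch, []).append(j)
--     matches = [0] * noff
--     for p, ch in enumerate(s):
--         js = where.get(ch, [])
--         k = _first_at_least(js, p - noff + 1)
--         while k < len(js) and js[k] <= p:
--             matches[p - js[k]] += 1
--             k += 1
--     return m - max(matches)
-- ===== Notes on version B (the rewrite author's own statement) =====
-- stated objective: alternative
-- what changed: B inverts the problem: it builds a dict mapping each character of t to its (ascending) list of positions, then scans s once, scatter-counting MATCHES per window diagonal (matches[p-j] += 1 for each in-window position j of s[p] in t, the in-window slice located by a hand-rolled binary search), and returns len(t) minus the maximum match count, instead of A's per-window mismatch scan with a running minimum.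
import Mathlib
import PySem

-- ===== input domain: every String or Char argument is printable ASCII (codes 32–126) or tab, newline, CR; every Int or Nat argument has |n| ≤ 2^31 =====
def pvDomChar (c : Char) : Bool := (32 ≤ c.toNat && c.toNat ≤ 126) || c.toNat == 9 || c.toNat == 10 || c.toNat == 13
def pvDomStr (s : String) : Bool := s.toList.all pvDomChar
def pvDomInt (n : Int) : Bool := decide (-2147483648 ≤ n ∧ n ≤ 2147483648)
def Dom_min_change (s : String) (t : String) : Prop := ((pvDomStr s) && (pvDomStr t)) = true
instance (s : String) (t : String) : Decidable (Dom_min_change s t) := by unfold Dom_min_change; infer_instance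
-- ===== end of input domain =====

-- B indexes t's characters by position and scatter-counts mcounts per window diagonal
-- in one scan of s, returning len(t) - max(mcounts) (objective: alternative).

-- ===== PORT A =====
-- window-by-window: for each offset i count mismatches, track the running minimum
def min_change (s : String) (t : String) : Int :=
  let ls := s.toList
  let lt := t.toList
  if (ls.length : Int) < (lt.length : Int) then -1
  else
    (List.range (ls.length - lt.length + 1)).foldl
      (fun m i =>
        let cc := (List.range lt.length).foldl
          (fun c j => if ls.getD (i + j) ' ' ≠ lt.getD j ' ' then c + 1 else c) (0 : Int)
        if cc < m then cc else m)
      (ls.length : Int)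

-- ===== PORT B =====
-- dict of t's positions per character; one scan of s scatter-counting matches on the
-- in-window slice of each position list (located by a hand-rolled binary search);
-- answer len(t) - max(mcounts).
-- ('where.setdefault(ch, []).append(j)' = Dict.modify ch [] (· ++ [j]): insert [] if
--  absent, then append — exact, including insertion order of new keys.)

-- port of _first_at_least: binary search for the first element >= x in ascending js
-- (js[mid] is always in range when lo < hi <= len js, so getD is exact)
def pvBisect (js : List Int) (x : Int) (lo hi : Nat) : Nat :=
  if lo < hi then
    if js.getD ((lo + hi) / 2) 0 < x then pvBisect js x ((lo + hi) / 2 + 1) hi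
    else pvBisect js x lo ((lo + hi) / 2)
  else lo
termination_by hi - lo
decreasing_by all_goals omega

-- port of the inner while loop: while k < len(js) and js[k] <= p: mcounts[p-js[k]] += 1
def pvEmit (js : List Int) (p : Int) (ms : List Int) (k : Nat) : List Int :=
  if k < js.length then
    if js.getD k 0 ≤ p then
      pvEmit js p
        (PySem.List.pySetD ms (p - js.getD k 0) (PySem.List.pyGetD ms (p - js.getD k 0) 0 + 1))
        (k + 1)
    else ms
  else ms
termination_by js.length - k

def min_change_alt (s : String) (t : String) : Int :=
  let ls := s.toList
  let lt := t.toList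
  if (ls.length : Int) < (lt.length : Int) then -1
  else
    let noff := ls.length - lt.length + 1
    let whereT : PySem.Dict Char (List Int) :=
      (PySem.List.enumerate lt 0).foldl
        (fun d p => d.modify p.2 [] (· ++ [p.1])) PySem.Dict.empty
    let mcounts := (PySem.List.enumerate ls 0).foldl
      (fun ms p =>
        let js := whereT.getD p.2 []
        pvEmit js p.1 ms (pvBisect js (p.1 - (noff : Int) + 1) 0 js.length))
      (List.replicate noff (0 : Int))
    (lt.length : Int) - (PySem.List.max? mcounts (fun x => x)).getD 0

-- ===== PRECONDITION & SPEC =====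
def Spec_min_change (s : String) (t : String) (out : Int) : Prop := out = min_change_alt s t
instance (s : String) (t : String) (out : Int) : Decidable (Spec_min_change s t out) := by unfold Spec_min_change; infer_instance

-- ===== CLAIM (what is proved, stated in full; the proofs are below) =====
def Claim_equal_min_change : Prop := ∀ (s : String) (t : String), Dom_min_change s t → Spec_min_change s t (min_change s t)

-- ===== LEMMAS AND PROOFS =====

-- mismatch / match counts of the window at offset i
def pvMis (ls lt : List Char) (i : Nat) : Int :=
  ((List.range lt.length).countP (fun j => ls.getD (i + j) ' ' ≠ lt.getD j ' ') : Nat)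
def pvMat (ls lt : List Char) (i : Nat) : Int :=
  ((List.range lt.length).countP (fun j => ls.getD (i + j) ' ' = lt.getD j ' ') : Nat)

theorem pvMis_add_pvMat (ls lt : List Char) (i : Nat) :
    pvMis ls lt i + pvMat ls lt i = (lt.length : Int) := by
  have h := List.length_eq_countP_add_countP
      (l := List.range lt.length) (fun j => decide (ls.getD (i + j) ' ' ≠ lt.getD j ' '))
  simp only [List.length_range] at h
  have h2 : (List.range lt.length).countP
      (fun a => decide ¬decide (ls.getD (i + a) ' ' ≠ lt.getD a ' ') = true)
      = (List.range lt.length).countP (fun j => ls.getD (i + j) ' ' = lt.getD j ' ') := by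
    apply List.countP_congr; intro j _; simp
  rw [h2] at h
  simp only [pvMis, pvMat]
  omega

theorem pvMis_le (ls lt : List Char) (i : Nat) : pvMis ls lt i ≤ (lt.length : Int) := by
  have := (List.range lt.length).countP_le_length (p := fun j => ls.getD (i + j) ' ' ≠ lt.getD j ' ')
  simpa [pvMis] using Int.ofNat_le.mpr (by simpa using this)

-- A's inner loop computes pvMis
theorem pv_inner_eq (ls lt : List Char) (i : Nat) :
    (List.range lt.length).foldl
        (fun c j => if ls.getD (i + j) ' ' ≠ lt.getD j ' ' then c + 1 else c) (0 : Int)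
      = pvMis ls lt i := by
  simpa [pvMis] using
    PySem.List.foldl_count_if (fun j => decide (ls.getD (i + j) ' ' ≠ lt.getD j ' '))
      (List.range lt.length) 0

-- a seed no smaller than the first element is absorbed by the min fold
theorem pv_seed_absorb (a c : Int) (h : c ≤ a) (rest : List Int) :
    (c :: rest).foldl (fun m x => if x < m then x else m) a
      = rest.foldl (fun m x => if x < m then x else m) c := by
  simp only [List.foldl_cons]
  rcases lt_or_eq_of_le h with h' | h'
  · simp [h']
  · subst h'; split <;> rfl

-- min fold = m - max fold over complements
theorem pv_dual (xs : List Int) (m : Int) : ∀ c : Int,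
    xs.foldl (fun mn x => if x < mn then x else mn) c
      = m - (xs.map (fun x => m - x)).foldl max (m - c) := by
  induction xs with
  | nil => intro c; simp
  | cons x t ih =>
      intro c
      simp only [List.foldl_cons, List.map_cons]
      have hseed : max (m - c) (m - x) = m - (if x < c then x else c) := by
        by_cases h : x < c
        · rw [if_pos h, max_eq_right (by omega)]
        · rw [if_neg h, max_eq_left (by omega)]
      rw [hseed]
      exact ih _

-- the dict of t's positions: lookup characterization
theorem pv_whereT (lt : List Char) (c : Char) :
    (((PySem.List.enumerate lt 0).foldl
        (fun d p => d.modify p.2 [] (· ++ [p.1])) PySem.Dict.empty).getD c [])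
      = ((PySem.List.enumerate lt 0).filter (fun p => p.2 == c)).map (·.1) := by
  have hmap : (PySem.List.enumerate lt 0).foldl
        (fun d p => d.modify p.2 [] (· ++ [p.1])) PySem.Dict.empty
      = ((PySem.List.enumerate lt 0).map (fun p => (p.2, p.1))).foldl
        (fun d q => d.modify q.1 [] (· ++ [q.2])) PySem.Dict.empty := by
    rw [List.foldl_map]
  rw [hmap, PySem.Dict.getD_foldl_modify_append]
  simp [List.filter_map, List.map_map, Function.comp_def]

-- on a strictly increasing list, takeWhile/dropWhile of a downward-closed test are filters
theorem pv_sorted_takeWhile (q : Int → Bool) (hmono : ∀ a b : Int, a ≤ b → q b → q a) :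
    ∀ l : List Int, l.Pairwise (· < ·) → l.takeWhile q = l.filter q := by
  intro l
  induction l with
  | nil => intro _; rfl
  | cons a l ih =>
      intro hp
      rw [List.pairwise_cons] at hp
      by_cases hq : q a
      · rw [List.takeWhile_cons_of_pos hq, List.filter_cons_of_pos hq, ih hp.2]
      · rw [List.takeWhile_cons_of_neg hq, List.filter_cons_of_neg hq]
        rw [List.filter_eq_nil_iff.mpr]
        intro b hb hqb
        exact hq (hmono a b (le_of_lt (hp.1 b hb)) hqb)
theorem pv_sorted_dropWhile (q : Int → Bool) (hmono : ∀ a b : Int, a ≤ b → q b → q a) :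
    ∀ l : List Int, l.Pairwise (· < ·) → l.dropWhile q = l.filter (fun j => !q j) := by
  intro l
  induction l with
  | nil => intro _; rfl
  | cons a l ih =>
      intro hp
      rw [List.pairwise_cons] at hp
      by_cases hq : q a
      · rw [List.dropWhile_cons_of_pos hq, List.filter_cons_of_neg (by simp [hq]), ih hp.2]
      · rw [List.dropWhile_cons_of_neg hq, List.filter_cons_of_pos (by simp [hq])]
        congr 1
        symm
        rw [List.filter_eq_self]
        intro b hb
        simp only [Bool.not_eq_true']
        by_contra hqb
        simp only [Bool.not_eq_false] at hqb
        exact hq (hmono a b (le_of_lt (hp.1 b hb)) hqb)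

-- the binary search returns the number of elements below x
theorem pv_bisect (js : List Int) (x : Int) (hs : js.Pairwise (· < ·)) :
    ∀ lo hi : Nat, lo ≤ hi → hi ≤ js.length →
      (∀ idx, idx < lo → idx < js.length → js.getD idx 0 < x) →
      (∀ idx, hi ≤ idx → idx < js.length → ¬ js.getD idx 0 < x) →
      pvBisect js x lo hi = js.countP (fun j => decide (j < x)) := by
  have hmono : ∀ (a b : Nat), a ≤ b → b < js.length → js.getD a 0 ≤ js.getD b 0 := by
    intro a b hab hb
    rcases Nat.eq_or_lt_of_le hab with rfl | hlt
    · exact le_refl _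
    · have := (List.pairwise_iff_getElem).mp hs a b (by omega) hb hlt
      rw [List.getD_eq_getElem?_getD, List.getElem?_eq_getElem (by omega : a < js.length),
        List.getD_eq_getElem?_getD, List.getElem?_eq_getElem hb]
      simpa using le_of_lt this
  suffices H : ∀ d lo hi : Nat, hi - lo ≤ d → lo ≤ hi → hi ≤ js.length →
      (∀ idx, idx < lo → idx < js.length → js.getD idx 0 < x) →
      (∀ idx, hi ≤ idx → idx < js.length → ¬ js.getD idx 0 < x) →
      pvBisect js x lo hi = js.countP (fun j => decide (j < x)) by
    exact fun lo hi => H (hi - lo) lo hi le_rfl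
  intro d
  induction d with
  | zero =>
      intro lo hi hd hlohi hhile hbelow habove
      have hlo : lo = hi := by omega
      rw [pvBisect, if_neg (by omega)]
      subst hlo
      conv_rhs => rw [← List.take_append_drop lo js]
      rw [List.countP_append]
      have h1 : (js.take lo).countP (fun j => decide (j < x)) = lo := by
        rw [List.countP_eq_length.mpr, List.length_take]
        · omega
        · intro b hb
          obtain ⟨idx, hidx, heq⟩ := List.getElem_of_mem hb
          have hlt2 : idx < lo := by simp [List.length_take] at hidx; omega
          have hlen2 : idx < js.length := by omega
          have hv := hbelow idx hlt2 hlen2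
          rw [List.getElem_take] at heq
          rw [List.getD_eq_getElem?_getD, List.getElem?_eq_getElem hlen2,
            Option.getD_some] at hv
          rw [← heq]
          simpa using hv
      have h2 : (js.drop lo).countP (fun j => decide (j < x)) = 0 := by
        rw [List.countP_eq_zero]
        intro b hb
        obtain ⟨idx, hidx, heq⟩ := List.getElem_of_mem hb
        have hlen2 : lo + idx < js.length := by
          simp [List.length_drop] at hidx; omega
        have hv := habove (lo + idx) (by omega) hlen2
        rw [List.getElem_drop] at heq
        rw [List.getD_eq_getElem?_getD, List.getElem?_eq_getElem hlen2,
          Option.getD_some] at hv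
        rw [← heq]
        simpa using hv
      rw [h1, h2]
      omega
  | succ d ihd =>
      intro lo hi hd hlohi hhile hbelow habove
      rw [pvBisect]
      by_cases h : lo < hi
      · rw [if_pos h]
        set mid := (lo + hi) / 2 with hmid
        have hmlt : mid < hi := by omega
        have hmge : lo ≤ mid := by omega
        have hmlen : mid < js.length := by omega
        by_cases hv : js.getD mid 0 < x
        · rw [if_pos hv]
          exact ihd (mid + 1) hi (by omega) (by omega) hhile
            (fun idx hidx hlen => lt_of_le_of_lt (hmono idx mid (by omega) hmlen) hv)
            habove
        · rw [if_neg hv]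
          exact ihd lo mid (by omega) (by omega) (by omega) hbelow
            (fun idx hidx hlen hc => hv (lt_of_le_of_lt (hmono mid idx hidx hlen) hc))
      · rw [if_neg h]
        have hlo : lo = hi := by omega
        subst hlo
        conv_rhs => rw [← List.take_append_drop lo js]
        rw [List.countP_append]
        have h1 : (js.take lo).countP (fun j => decide (j < x)) = lo := by
          rw [List.countP_eq_length.mpr, List.length_take]
          · omega
          · intro b hb
            obtain ⟨idx, hidx, heq⟩ := List.getElem_of_mem hb
            have hlt2 : idx < lo := by simp [List.length_take] at hidx; omega
            have hlen2 : idx < js.length := by omega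
            have hv := hbelow idx hlt2 hlen2
            rw [List.getElem_take] at heq
            rw [List.getD_eq_getElem?_getD, List.getElem?_eq_getElem hlen2,
              Option.getD_some] at hv
            rw [← heq]
            simpa using hv
        have h2 : (js.drop lo).countP (fun j => decide (j < x)) = 0 := by
          rw [List.countP_eq_zero]
          intro b hb
          obtain ⟨idx, hidx, heq⟩ := List.getElem_of_mem hb
          have hlen2 : lo + idx < js.length := by
            simp [List.length_drop] at hidx; omega
          have hv := habove (lo + idx) (by omega) hlen2
          rw [List.getElem_drop] at heq
          rw [List.getD_eq_getElem?_getD, List.getElem?_eq_getElem hlen2,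
            Option.getD_some] at hv
          rw [← heq]
          simpa using hv
        rw [h1, h2]
        omega

-- the emit loop preserves the length of the counter array
theorem pv_emit_len (js : List Int) (p : Int) :
    ∀ k (ms : List Int), (pvEmit js p ms k).length = ms.length := by
  suffices H : ∀ d k (ms : List Int), js.length - k ≤ d → (pvEmit js p ms k).length = ms.length by
    exact fun k ms => H (js.length - k) k ms le_rfl
  intro d
  induction d with
  | zero =>
      intro k ms hd
      rw [pvEmit, if_neg (by omega)]
  | succ d ihd =>
      intro k ms hd
      rw [pvEmit]
      by_cases hk : k < js.length
      · rw [if_pos hk]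
        by_cases hp : js.getD k 0 ≤ p
        · rw [if_pos hp, ihd (k + 1) _ (by omega), PySem.List.length_pySetD]
        · rw [if_neg hp]
      · rw [if_neg hk]

-- the emit loop's effect at a fixed index i
theorem pv_emit (js : List Int) (p : Int) (i : Nat) :
    ∀ k (ms : List Int), i < ms.length →
      (∀ j ∈ js.drop k, p - (ms.length : Int) < j) →
      (pvEmit js p ms k).getD i 0
        = ms.getD i 0 + (((js.drop k).takeWhile (fun j => decide (j ≤ p))).count (p - (i : Int)) : Int) := by
  suffices H : ∀ d k (ms : List Int), js.length - k ≤ d → i < ms.length →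
      (∀ j ∈ js.drop k, p - (ms.length : Int) < j) →
      (pvEmit js p ms k).getD i 0
        = ms.getD i 0 + (((js.drop k).takeWhile (fun j => decide (j ≤ p))).count (p - (i : Int)) : Int) by
    exact fun k ms => H (js.length - k) k ms le_rfl
  intro d
  induction d with
  | zero =>
      intro k ms hd hi hin
      rw [pvEmit, if_neg (by omega), List.drop_eq_nil_of_le (by omega)]
      simp
  | succ d ihd =>
      intro k ms hd hi hin
      rw [pvEmit]
      by_cases hk : k < js.length
      · rw [if_pos hk]
        have hdrop : js.drop k = js[k] :: js.drop (k + 1) := List.drop_eq_getElem_cons hk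
        have hgd : js.getD k 0 = js[k] := by
          rw [List.getD_eq_getElem?_getD, List.getElem?_eq_getElem hk, Option.getD_some]
        by_cases hp : js.getD k 0 ≤ p
        · rw [if_pos hp]
          set v := js.getD k 0 with hv
          set ms' := PySem.List.pySetD ms (p - v) (PySem.List.pyGetD ms (p - v) 0 + 1) with hms'
          have hvin : p - (ms.length : Int) < v := by
            apply hin
            rw [hdrop, ← hgd]
            exact List.mem_cons_self
          have hlen' : ms'.length = ms.length := by rw [hms', PySem.List.length_pySetD]
          have hrange : 0 ≤ p - v ∧ (p - v).toNat < ms.length := by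
            constructor <;> omega
          rw [ihd (k + 1) ms' (by omega) (by omega)
            (by intro j hj
                rw [hlen']
                apply hin
                rw [hdrop]
                exact List.mem_cons_of_mem _ hj)]
          rw [hdrop, List.takeWhile_cons_of_pos (by rw [← hgd]; simpa using hp)]
          have hcount : (((js[k] : Int) :: (js.drop (k + 1)).takeWhile (fun j => decide (j ≤ p))).count (p - (i : Int)) : Int)
              = ((js.drop (k + 1)).takeWhile (fun j => decide (j ≤ p))).count (p - (i : Int))
                + (if p - (i : Int) = js[k] then (1 : Int) else 0) := by
            by_cases h : p - (i : Int) = js[k]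
            · simp [h]
            · have h' : ¬ (js[k] : Int) = p - (i : Int) := fun hh => h hh.symm
              simp [h, h']
          rw [hcount]
          have hms'i : ms'.getD i 0 = ms.getD i 0 + (if p - (i : Int) = js[k] then (1 : Int) else 0) := by
            rw [hms', PySem.List.pySetD_of_nonneg _ _ hrange.1]
            by_cases h : p - (i : Int) = js[k]
            · have htn : (p - v).toNat = i := by omega
              rw [htn, PySem.List.pyGetD_of_nonneg _ _ hrange.1, htn,
                List.getD_eq_getElem?_getD, List.getElem?_set_self (by omega),
                Option.getD_some, if_pos h, List.getD_eq_getElem?_getD]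
            · have htn : (p - v).toNat ≠ i := by omega
              rw [List.getD_eq_getElem?_getD, List.getElem?_set_ne htn,
                ← List.getD_eq_getElem?_getD, if_neg h]
              omega
          rw [hms'i]
          ring
        · rw [if_neg hp]
          rw [hdrop, List.takeWhile_cons_of_neg (by rw [← hgd]; simpa using hp)]
          simp
      · rw [if_neg hk, List.drop_eq_nil_of_le (by omega)]
        simp

-- one position of s: binary search + emit add exactly the diagonal match indicator
theorem pv_step (js : List Int) (hs : js.Pairwise (· < ·)) (p : Int) (noff : Nat)
    (i : Nat) (hi : i < noff) (ms : List Int) (hms : ms.length = noff) :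
    (pvEmit js p ms (pvBisect js (p - (noff : Int) + 1) 0 js.length)).getD i 0
      = ms.getD i 0 + (js.count (p - (i : Int)) : Int) := by
  set x := p - (noff : Int) + 1 with hx
  have hk0 : pvBisect js x 0 js.length = js.countP (fun j => decide (j < x)) :=
    pv_bisect js x hs 0 js.length (by omega) le_rfl
      (by omega) (fun idx h1 h2 => absurd h1 (by omega))
  have htw : js.takeWhile (fun j => decide (j < x)) = js.filter (fun j => decide (j < x)) :=
    pv_sorted_takeWhile _ (fun a b hab hb => by simp_all; omega) js hs
  have hdw : js.dropWhile (fun j => decide (j < x)) = js.filter (fun j => !decide (j < x)) :=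
    pv_sorted_dropWhile _ (fun a b hab hb => by simp_all; omega) js hs
  have hdropk0 : js.drop (js.countP (fun j => decide (j < x))) = js.filter (fun j => !decide (j < x)) := by
    have hlen : js.countP (fun j => decide (j < x)) = (js.takeWhile (fun j => decide (j < x))).length := by
      rw [htw, List.countP_eq_length_filter]
    rw [hlen]
    nth_rewrite 2 [← List.takeWhile_append_dropWhile (p := fun j => decide (j < x)) (l := js)]
    rw [List.drop_left, hdw]
  rw [hk0, pv_emit js p i _ ms (by omega)
    (by rw [hdropk0]
        intro j hj
        rw [List.mem_filter] at hj
        have := hj.2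
        simp at this
        omega)]
  rw [hdropk0]
  have hsf : (js.filter (fun j => !decide (j < x))).Pairwise (· < ·) := hs.filter _
  have htw2 : (js.filter (fun j => !decide (j < x))).takeWhile (fun j => decide (j ≤ p))
      = (js.filter (fun j => !decide (j < x))).filter (fun j => decide (j ≤ p)) :=
    pv_sorted_takeWhile _ (fun a b hab hb => by simp_all; omega) _ hsf
  rw [htw2, List.filter_filter]
  have hcnt : ((js.filter (fun a => decide (a ≤ p) && !decide (a < x))).count (p - (i : Int)))
      = js.count (p - (i : Int)) := by
    apply List.count_filter
    simp
    omega
  rw [hcnt]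

-- the per-character position lists are strictly increasing
theorem pv_whereT_sorted (lt : List Char) (c : Char) :
    ((((PySem.List.enumerate lt 0).filter (fun p => p.2 == c)).map (·.1)).Pairwise (· < ·)) := by
  rw [List.pairwise_map]
  exact (PySem.List.pairwise_lt_enumerate lt 0).filter _

-- outer scan of s: length preserved
theorem pv_outer_len (noff : Nat) (w : Char → List Int) (L : List (Int × Char)) :
    ∀ ms : List Int,
    (L.foldl (fun ms p =>
        pvEmit (w p.2) p.1 ms
          (pvBisect (w p.2) (p.1 - (noff : Int) + 1) 0 (w p.2).length)) ms).length
      = ms.length := by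
  induction L with
  | nil => intro ms; rfl
  | cons p L ih => intro ms; rw [List.foldl_cons, ih, pv_emit_len]

-- outer scan of s: value at a fixed index i
theorem pv_outer (noff : Nat) (w : Char → List Int) (hw : ∀ c, (w c).Pairwise (· < ·))
    (i : Nat) (hi : i < noff)
    (L : List (Int × Char)) : ∀ ms : List Int, ms.length = noff →
    (L.foldl (fun ms p =>
        pvEmit (w p.2) p.1 ms
          (pvBisect (w p.2) (p.1 - (noff : Int) + 1) 0 (w p.2).length)) ms).getD i 0
      = ms.getD i 0 + (L.map (fun p => (((w p.2).count (p.1 - (i : Int))) : Int))).sum := by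
  induction L with
  | nil => intro ms _; simp
  | cons p L ih =>
      intro ms hms
      rw [List.foldl_cons, ih _ (by rw [pv_emit_len]; exact hms),
        pv_step (w p.2) (hw p.2) p.1 noff i hi ms hms]
      simp only [List.map_cons, List.sum_cons]
      ring

-- the per-character position list: count characterization
theorem pv_wcount (lt : List Char) (c : Char) (z : Int) :
    ((((PySem.List.enumerate lt 0).filter (fun p => p.2 == c)).map (·.1)).count z : Int)
      = if 0 ≤ z ∧ z < (lt.length : Int) ∧ lt.getD z.toNat ' ' = c then 1 else 0 := by
  set L := (((PySem.List.enumerate lt 0).filter (fun p => p.2 == c)).map (·.1)) with hL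
  have hnd : L.Nodup := by
    rw [hL, List.Nodup, List.pairwise_map]
    exact ((PySem.List.pairwise_lt_enumerate lt 0).filter _).imp (fun h => ne_of_lt h)
  have hmem : z ∈ L ↔ (0 ≤ z ∧ z < (lt.length : Int) ∧ lt.getD z.toNat ' ' = c) := by
    rw [hL]
    simp only [List.mem_map, List.mem_filter, PySem.List.mem_enumerate_iff]
    constructor
    · rintro ⟨p, ⟨⟨k, hk, rfl⟩, hc⟩, rfl⟩
      simp only [beq_iff_eq] at hc
      dsimp only
      refine ⟨by omega, by omega, ?_⟩
      have : ((0 : Int) + (k : Int)).toNat = k := by omega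
      rw [this, List.getD_eq_getElem?_getD, List.getElem?_eq_getElem hk]
      simpa using hc
    · rintro ⟨h0, hlt, hc⟩
      refine ⟨(z, c), ⟨⟨z.toNat, by omega, ?_⟩, by simp⟩, rfl⟩
      have hzk : z.toNat < lt.length := by omega
      have : lt[z.toNat] = c := by
        rw [List.getD_eq_getElem?_getD, List.getElem?_eq_getElem hzk] at hc
        simpa using hc
      simp [this]
      omega
  by_cases h : 0 ≤ z ∧ z < (lt.length : Int) ∧ lt.getD z.toNat ' ' = c
  · rw [if_pos h]
    exact_mod_cast List.count_eq_one_of_mem hnd (hmem.mpr h)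
  · rw [if_neg h]
    exact_mod_cast List.count_eq_zero_of_not_mem (fun hm => h (hmem.mp hm))

-- the scattered diagonal sum over all of s is the match count of window i
theorem pv_sum_eq_mat (ls lt : List Char) (i : Nat) (him : i + lt.length ≤ ls.length) :
    ((List.range ls.length).map (fun (k : Nat) =>
        if 0 ≤ (k : Int) - (i : Int) ∧ (k : Int) - (i : Int) < (lt.length : Int) ∧
            lt.getD ((k : Int) - (i : Int)).toNat ' ' = ls.getD k ' '
        then (1 : Int) else 0)).sum = pvMat ls lt i := by
  set m := lt.length
  set P := fun k : Nat =>
      0 ≤ (k : Int) - (i : Int) ∧ (k : Int) - (i : Int) < (m : Int) ∧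
        lt.getD ((k : Int) - (i : Int)).toNat ' ' = ls.getD k ' ' with hP
  obtain ⟨r, hr⟩ : ∃ r, ls.length = (i + m) + r := ⟨ls.length - (i + m), by omega⟩
  rw [hr, List.range_add, List.range_add, List.append_assoc, List.map_append, List.sum_append,
    List.map_append, List.sum_append]
  have h1 : ((List.range i).map (fun k => if P k then (1 : Int) else 0)).sum = 0 := by
    apply List.sum_eq_zero
    intro x hx
    simp only [List.mem_map, List.mem_range] at hx
    obtain ⟨k, hk, rfl⟩ := hx
    rw [if_neg]
    rw [hP]
    intro h
    omega
  have h2 : (((List.range m).map (fun x => i + x)).map (fun k => if P k then (1 : Int) else 0)).sum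
      = pvMat ls lt i := by
    rw [List.map_map]
    have hcong : ∀ k ∈ List.range m,
        ((fun k => if P k then (1 : Int) else 0) ∘ fun x => i + x) k
          = if ls.getD (i + k) ' ' = lt.getD k ' ' then (1 : Int) else 0 := by
      intro k hk
      simp only [List.mem_range] at hk
      simp only [Function.comp_apply, hP]
      have ht : ((i + k : Nat) : Int) - (i : Int) = (k : Int) := by push_cast; omega
      rw [ht]
      have htn : ((k : Int)).toNat = k := by omega
      rw [htn]
      by_cases he : lt.getD k ' ' = ls.getD (i + k) ' '
      · rw [if_pos ⟨by omega, by exact_mod_cast hk, he⟩, if_pos he.symm]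
      · rw [if_neg (fun h => he h.2.2), if_neg (fun h => he h.symm)]
    rw [List.map_congr_left hcong]
    have := PySem.List.sum_map_ite_one_zero
        (fun k => decide (ls.getD (i + k) ' ' = lt.getD k ' ')) (List.range m)
    simp only [decide_eq_true_eq] at this
    rw [this]
    rfl
  have h3 : (((List.range r).map (fun x => i + m + x)).map
      (fun k => if P k then (1 : Int) else 0)).sum = 0 := by
    rw [List.map_map]
    apply List.sum_eq_zero
    intro x hx
    simp only [List.mem_map, List.mem_range, Function.comp_apply] at hx
    obtain ⟨k, hk, rfl⟩ := hx
    rw [if_neg]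
    rw [hP]
    intro h
    have := h.2.1
    push_cast at this
    omega
  rw [h1, h2, h3]
  ring

theorem pv_main (s t : String) : min_change s t = min_change_alt s t := by
  unfold min_change min_change_alt
  set ls := s.toList
  set lt := t.toList
  by_cases hlen : (ls.length : Int) < (lt.length : Int)
  · simp [hlen]
  · simp only [hlen, if_false]
    set n := ls.length with hn
    set m := lt.length with hm
    set noff := n - m + 1 with hnoff
    have hmn : m ≤ n := by omega
    -- B side: the counter array is the list of per-offset match counts
    set W := (PySem.List.enumerate lt 0).foldl
        (fun d p => d.modify p.2 [] (· ++ [p.1])) PySem.Dict.empty with hW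
    set mcounts := (PySem.List.enumerate ls 0).foldl
      (fun ms p =>
        pvEmit (W.getD p.2 []) p.1 ms
          (pvBisect (W.getD p.2 []) (p.1 - ((noff : Nat) : Int) + 1) 0 (W.getD p.2 []).length))
      (List.replicate noff (0 : Int)) with hmc
    have hw : ∀ c, ((W.getD c [] : List Int)).Pairwise (· < ·) := by
      intro c
      rw [hW, pv_whereT]
      exact pv_whereT_sorted lt c
    have hlenmc : mcounts.length = noff := by
      rw [hmc, pv_outer_len noff (fun c => W.getD c []) (PySem.List.enumerate ls 0)]
      simp
    have hval : ∀ i, i < noff → mcounts.getD i 0 = pvMat ls lt i := by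
      intro i hi
      rw [hmc, pv_outer noff (fun c => W.getD c []) hw i hi (PySem.List.enumerate ls 0)
        (List.replicate noff (0 : Int)) (by simp)]
      rw [PySem.List.enumerate_eq_map_pyRange ls ' ', List.map_map]
      have hrange : PySem.List.pyRange 0 (PySem.List.len ls) 1
          = (List.range n).map (fun k : Nat => (k : Int)) := by
        rw [PySem.List.pyRange_one]
        simp only [PySem.List.len_eq, sub_zero, Int.toNat_natCast, zero_add]
        rfl
      rw [hrange, List.map_map]
      have hcong : ∀ k ∈ List.range n,
          (((fun p : Int × Char => ((W.getD p.2 []).count (p.1 - (i : Int)) : Int)) ∘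
            (fun j : Int => (j, PySem.List.pyGetD ls j ' '))) ∘ (fun k : Nat => (k : Int))) k
          = (fun (k : Nat) =>
              if 0 ≤ (k : Int) - (i : Int) ∧ (k : Int) - (i : Int) < (m : Int) ∧
                  lt.getD ((k : Int) - (i : Int)).toNat ' ' = ls.getD k ' '
              then (1 : Int) else 0) k := by
        intro k hk
        simp only [Function.comp_apply, PySem.List.pyGetD_natCast]
        rw [hW, pv_whereT, pv_wcount]
      rw [List.map_congr_left hcong, pv_sum_eq_mat ls lt i (by omega)]
      simp
    have hmceq : mcounts = pvMat ls lt 0 ::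
        (List.range (noff - 1)).map (fun k => pvMat ls lt (k + 1)) := by
      have h1 : noff = (noff - 1) + 1 := by omega
      apply List.ext_getElem
      · rw [hlenmc]
        simp only [List.length_cons, List.length_map, List.length_range]
        omega
      · intro i h1' h2'
        have hi : i < noff := by omega
        have hv := hval i hi
        rw [List.getD_eq_getElem?_getD, List.getElem?_eq_getElem h1', Option.getD_some] at hv
        rw [hv]
        rcases i with _ | i'
        · simp
        · simp only [List.length_cons, List.length_map, List.length_range] at h2'
          simp
    -- A side: min fold over mismatch counts
    have hA : (List.range noff).foldl
        (fun mn i =>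
          let cc := (List.range m).foldl
            (fun c j => if ls.getD (i + j) ' ' ≠ lt.getD j ' ' then c + 1 else c) (0 : Int)
          if cc < mn then cc else mn) (n : Int)
      = ((List.range noff).map (fun i => pvMis ls lt i)).foldl
          (fun mn x => if x < mn then x else mn) (n : Int) := by
      rw [List.foldl_map]
      apply PySem.List.foldl_congr_mem
      intro acc x _
      rw [hm, pv_inner_eq]
    rw [hA, hmceq]
    have hrs : (List.range noff).map (fun i => pvMis ls lt i)
        = pvMis ls lt 0 :: ((List.range (noff - 1)).map (fun k => pvMis ls lt (k + 1))) := by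
      have h1 : noff = (noff - 1) + 1 := by omega
      rw [h1, List.range_succ_eq_map, List.map_cons, List.map_map]
      rfl
    rw [hrs, pv_seed_absorb _ _ (le_trans (pvMis_le ls lt 0) (by exact_mod_cast hmn)) _,
      pv_dual _ (m : Int) (pvMis ls lt 0), PySem.List.max?_id_cons]
    have hmm : ∀ i, (m : Int) - pvMis ls lt i = pvMat ls lt i := by
      intro i
      have := pvMis_add_pvMat ls lt i
      omega
    rw [List.map_map]
    have : ((List.range (noff - 1)).map
        ((fun x => (m : Int) - x) ∘ fun k => pvMis ls lt (k + 1)))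
        = (List.range (noff - 1)).map (fun k => pvMat ls lt (k + 1)) := by
      apply List.map_congr_left
      intro k _
      simp only [Function.comp_apply, hmm]
    rw [this, hmm, Option.getD_some]


-- ===== VERDICT (by name: the statement is the Claim_ definition above) =====
theorem min_change_spec : Claim_equal_min_change := by
  intro s t _
  unfold Spec_min_change
  exact pv_main s t
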